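-- pv_equiv track=rewrite | github.com/frisedel/advent2021 | day7/adv7.py | get_crab_map
-- ===== SOURCE A (Python) =====
-- from typing import Dict, List
--
-- def get_crab_map(crabs_data: List[int]) -> Dict[int, int]:
--     crabs = crabs_data[:]
--     crabs.sort()
--     crabs_grouped: Dict[int, int] = {}
--
--     for crab in crabs:
--         if crab not in crabs_grouped.keys():
--             crabs_grouped[crab] = 1
--         else:
--             crabs_grouped[crab] += 1
--
--     return crabs_grouped
-- ===== SOURCE B (Python) =====
-- from typing import Dict, List
--
-- def get_crab_map(crabs_data: List[int]) -> Dict[int, int]: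
--     pairs = []
--     for crab in sorted(crabs_data):
--         if pairs and pairs[-1][0] == crab:
--             pairs[-1] = (crab, pairs[-1][1] + 1)
--         else:
--             pairs.append((crab, 1))
--     return dict(pairs)
-- ===== Notes on version B (the rewrite author's own statement) =====
-- stated objective: alternative
-- what changed: Instead of counting with a dict and a per-element membership test, B run-length-encodes the sorted list by merging each element into the last (value, count) pair of a plain list, with no dict lookups at all, and only turns the finished pair list into a dict at the end.
import Mathlib
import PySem

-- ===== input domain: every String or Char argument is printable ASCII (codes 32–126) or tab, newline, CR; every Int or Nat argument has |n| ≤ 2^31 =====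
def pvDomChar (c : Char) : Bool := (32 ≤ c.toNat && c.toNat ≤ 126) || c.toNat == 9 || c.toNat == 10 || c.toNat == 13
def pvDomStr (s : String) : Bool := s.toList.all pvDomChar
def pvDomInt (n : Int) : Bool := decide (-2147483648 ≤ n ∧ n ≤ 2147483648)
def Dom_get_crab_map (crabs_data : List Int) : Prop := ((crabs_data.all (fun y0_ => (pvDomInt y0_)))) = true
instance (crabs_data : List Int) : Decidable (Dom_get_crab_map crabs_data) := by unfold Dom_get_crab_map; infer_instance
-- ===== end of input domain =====

-- B run-length-encodes the sorted list by merging into the last pair of a plain list (no dict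
-- lookups during the loop) and builds the dict once at the end; A counts into a dict with a
-- membership test per element. Alternative decomposition, same cost.

-- ===== PORT A =====
-- crabs = sorted copy; then for crab in crabs: if absent insert 1 else += 1; return the dict (as items)
def get_crab_map (crabs_data : List Int) : List (Int × Int) :=
  let crabs := PySem.List.sorted crabs_data (fun x => x) false
  (crabs.foldl
    (fun d crab =>
      if d.contains crab = false then d.insert crab 1
      else d.modify crab 0 (· + 1))
    (PySem.Dict.empty : PySem.Dict Int Int)).items

-- ===== PORT B =====
-- pairs[-1] check / in-place update of the last pair: the accumulator is kept REVERSED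
-- (its head is Python's pairs[-1]) and reversed back after the loop — exact same pairs.
def altStep (acc : List (Int × Int)) (crab : Int) : List (Int × Int) :=
  match acc with
  | (k, c) :: rest => if k = crab then (crab, c + 1) :: rest else (crab, 1) :: (k, c) :: rest
  | [] => [(crab, 1)]

-- for crab in sorted(crabs_data): merge into pairs[-1] or append (crab, 1); return dict(pairs)
def get_crab_map_alt (crabs_data : List Int) : List (Int × Int) :=
  let pairs := ((PySem.List.sorted crabs_data (fun x => x) false).foldl altStep []).reverse
  (pairs.foldl (fun d p => d.insert p.1 p.2) (PySem.Dict.empty : PySem.Dict Int Int)).items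

-- ===== PRECONDITION & SPEC =====
def Spec_get_crab_map (crabs_data : List Int) (out : List (Int × Int)) : Prop := out = get_crab_map_alt crabs_data
instance (crabs_data : List Int) (out : List (Int × Int)) : Decidable (Spec_get_crab_map crabs_data out) := by unfold Spec_get_crab_map; infer_instance

-- ===== CLAIM (what is proved, stated in full; the proofs are below) =====
def Claim_equal_get_crab_map : Prop := ∀ (crabs_data : List Int), Dom_get_crab_map crabs_data → Spec_get_crab_map crabs_data (get_crab_map crabs_data)

-- ===== LEMMAS AND PROOFS =====

-- A's branch on a missing key is exactly Counter's modify step.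
theorem astep_eq_counter_step (d : PySem.Dict Int Int) (c : Int) :
    (if d.contains c = false then d.insert c 1 else d.modify c 0 (· + 1))
      = d.modify c 0 (· + 1) := by
  by_cases h : d.contains c = false
  · simp [h, PySem.Dict.modify, PySem.Dict.insert, PySem.Dict.getD_of_not_contains d 0 h]
  · simp [h]

theorem afold_eq_counter (l : List Int) :
    (l.foldl (fun d crab =>
        if d.contains crab = false then d.insert crab 1
        else d.modify crab 0 (· + 1)) (PySem.Dict.empty : PySem.Dict Int Int))
      = PySem.Dict.counter l := by
  rw [PySem.Dict.counter_eq_foldl]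
  exact List.foldl_ext _ _ _ (fun d c _ => astep_eq_counter_step d c)

theorem foldl_set_add_sublist (xs : List Int) :
    ∀ acc : List Int, (xs.foldl PySem.Set.add acc).Sublist (acc ++ xs) := by
  induction xs with
  | nil => intro acc; simp
  | cons x t ih =>
      intro acc
      have h1 := ih (PySem.Set.add acc x)
      have h2 : (PySem.Set.add acc x ++ t).Sublist (acc ++ x :: t) := by
        unfold PySem.Set.add
        split
        · simp [List.Sublist.append (List.Sublist.refl acc)
            (List.sublist_cons_self x t)]
        · simp
      simpa using h1.trans h2

theorem ofList_sublist (xs : List Int) : (PySem.Set.ofList xs).Sublist xs := by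
  simpa [PySem.Set.ofList, PySem.Set.empty] using foldl_set_add_sublist xs []

theorem ofList_pairwise_lt (l : List Int) (hs : l.Pairwise (· ≤ ·)) :
    (PySem.Set.ofList l).Pairwise (· < ·) := by
  have hle : (PySem.Set.ofList l).Pairwise (· ≤ ·) := hs.sublist (ofList_sublist l)
  have hne := PySem.Set.nodup_ofList l
  exact (hle.and hne).imp (fun h => lt_of_le_of_ne h.1 h.2)

-- a strictly increasing list whose member x bounds all elements has x at the head of its reverse
theorem reverse_head_of_max (u : List Int) (hu : u.Pairwise (· < ·)) (x : Int)
    (hx : x ∈ u) (hmax : ∀ y ∈ u, y ≤ x) :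
    ∃ r, u.reverse = x :: r := by
  have hrevp : u.reverse.Pairwise (fun a b => b < a) := by
    simpa [List.pairwise_reverse] using hu
  cases hrev : u.reverse with
  | nil =>
      exfalso
      have : u = [] := by simpa using congrArg List.reverse hrev
      simp [this] at hx
  | cons z r =>
      have hz : z ∈ u := by
        rw [← List.mem_reverse, hrev]; exact List.mem_cons_self
      have hxzr : x ∈ z :: r := by rw [← hrev, List.mem_reverse]; exact hx
      rcases List.mem_cons.mp hxzr with h | h
      · exact ⟨r, by rw [h]⟩
      · exfalso
        have hlt : x < z := by
          have := hrevp; rw [hrev] at this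
          exact (List.pairwise_cons.mp this).1 x h
        have : z ≤ x := hmax z hz
        omega

-- run-length encoding of a sorted list = reversed map over its distinct values
theorem rle_sorted (l : List Int) (hs : l.Pairwise (· ≤ ·)) :
    l.foldl altStep []
      = (PySem.Set.ofList l).reverse.map (fun a => (a, (l.count a : Int))) := by
  induction l using List.reverseRecOn with
  | nil => simp [PySem.Set.ofList, PySem.Set.empty]
  | append_singleton l x ih =>
      have hl : l.Pairwise (· ≤ ·) := hs.sublist (by simp)
      have hmax : ∀ y ∈ l, y ≤ x := by
        have := List.pairwise_append.mp hs
        intro y hy; exact this.2.2 y hy x (by simp)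
      have hof : PySem.Set.ofList (l ++ [x]) = PySem.Set.add (PySem.Set.ofList l) x := by
        simp [PySem.Set.ofList_eq_foldl, List.foldl_append]
      have hcount : ∀ a : Int, (l ++ [x]).count a = l.count a + (if a = x then 1 else 0) := by
        intro a
        rw [List.count_append]
        by_cases h : a = x
        · subst h; simp
        · have hxa : x ≠ a := fun q => h q.symm
          simp [h, hxa]
      rw [List.foldl_append, ih hl]
      by_cases hmem : x ∈ PySem.Set.ofList l
      · -- merge branch: the head of the reversed distinct list is x
        obtain ⟨r, hr⟩ := reverse_head_of_max (PySem.Set.ofList l) (ofList_pairwise_lt l hl) x hmem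
          (fun y hy => hmax y ((PySem.Set.mem_ofList l y).mp hy))
        have hxinl : x ∈ l := (PySem.Set.mem_ofList l x).mp hmem
        have hadd : PySem.Set.add (PySem.Set.ofList l) x = PySem.Set.ofList l := by
          simp [PySem.Set.add, PySem.Set.mem_ofList, hxinl]
        have hrnodup : (x :: r).Nodup := by
          rw [← hr]; exact List.nodup_reverse.mpr (PySem.Set.nodup_ofList l)
        rw [hof, hadd, hr]
        have htail : List.map (fun a => (a, (l.count a : Int))) r
            = List.map (fun a => (a, ((l ++ [x]).count a : Int))) r := by
          apply List.map_congr_left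
          intro a ha
          have hax : a ≠ x := fun h => (List.nodup_cons.mp hrnodup).1 (h ▸ ha)
          rw [hcount a, if_neg hax, add_zero]
        simp only [List.map_cons, List.foldl_cons, List.foldl_nil, altStep, ← htail]
        rw [hcount x, if_pos rfl, Nat.cast_add, Nat.cast_one]
        simp
      · -- append branch: x is fresh, head (if any) differs from x
        have hxl : x ∉ l := fun h => hmem ((PySem.Set.mem_ofList l x).mpr h)
        have hadd : PySem.Set.add (PySem.Set.ofList l) x = PySem.Set.ofList l ++ [x] := by
          simp [PySem.Set.add, PySem.Set.mem_ofList, hxl]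
        have hcongr : ∀ a ∈ (PySem.Set.ofList l).reverse,
            (a, (l.count a : Int)) = (a, ((l ++ [x]).count a : Int)) := by
          intro a ha
          have hax : a ≠ x := fun h => hmem (h ▸ List.mem_reverse.mp ha)
          rw [hcount a, if_neg hax, add_zero]
        rw [hof, hadd]
        rw [List.reverse_append, List.reverse_singleton, List.singleton_append, List.map_cons]
        rw [hcount x, if_pos rfl, List.count_eq_zero_of_not_mem hxl]
        cases hrev : (PySem.Set.ofList l).reverse with
        | nil => simp [altStep]
        | cons p ps =>
            have hp : p ∈ PySem.Set.ofList l := by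
              rw [← List.mem_reverse, hrev]; exact List.mem_cons_self
            have hpx : p ≠ x := fun h => hmem (h ▸ hp)
            rw [List.map_cons, List.foldl_cons, List.foldl_nil]
            simp only [altStep, if_neg hpx]
            rw [List.map_cons]
            refine congrArg₂ List.cons (by norm_num) ?_
            refine congrArg₂ List.cons (hcongr p (hrev ▸ List.mem_cons_self)) ?_
            apply List.map_congr_left
            intro a ha
            exact hcongr a (hrev ▸ List.mem_cons_of_mem p ha)

-- ===== VERDICT (by name: the statement is the Claim_ definition above) =====
theorem get_crab_map_spec : Claim_equal_get_crab_map := by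
  intro xs _
  unfold Spec_get_crab_map get_crab_map get_crab_map_alt
  dsimp only
  rw [afold_eq_counter, PySem.Dict.items_counter,
      rle_sorted _ (PySem.List.sorted_pairwise xs (fun x => x)),
      ]
  -- pairs = (u.reverse.map f).reverse = u.map f
  rw [show ((PySem.Set.ofList (PySem.List.sorted xs (fun x => x) false)).reverse.map
        (fun a => (a, ((PySem.List.sorted xs (fun x => x) false).count a : Int)))).reverse
      = (PySem.Set.ofList (PySem.List.sorted xs (fun x => x) false)).map
        (fun a => (a, ((PySem.List.sorted xs (fun x => x) false).count a : Int))) from by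
    rw [← List.map_reverse, List.reverse_reverse]]
  set u := PySem.Set.ofList (PySem.List.sorted xs (fun x => x) false) with hu
  set f := fun a : Int => (a, ((PySem.List.sorted xs (fun x => x) false).count a : Int)) with hf
  have hfresh := PySem.Dict.items_foldl_insert_fresh (l := u.map f) (k := fun p => p.1)
    (v := fun p => p.2) (d := (PySem.Dict.empty : PySem.Dict Int Int))
    (by intro a _; exact PySem.Dict.contains_empty a.1)
    (by
      have : (u.map f).map (fun p => p.1) = u := by simp [hf, Function.comp_def]
      rw [this]; exact PySem.Set.nodup_ofList _)
  simpa [PySem.Dict.empty] using hfresh.symm
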